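-- pv_equiv track=rewrite | github.com/annotell/master-thesis-automatic-label-error-detection-2023 | postprocessing/code/OD2_CL.py | gen_id_mapper
-- ===== SOURCE A (Python) =====
-- def gen_id_mapper(shift_all, shift_target):
--     id_mapper = {}
--     counter = 0
--     shift_target_reverse = {v: k for k, v in shift_target.items()}
--
--     # First pass: Map existing items to new values based on shift_target
--     for old_id, name in shift_all.items():
--         if name in shift_target_reverse:
--             id_mapper[old_id] = shift_target_reverse[name]
--
--     # Second pass: For remaining items, assign new values
--     for old_id, name in shift_all.items():
--         if name not in shift_target_reverse:
--             while counter in shift_target_reverse.values():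
--                 counter += 1
--             id_mapper[old_id] = counter
--             counter += 1
--
--     return id_mapper
-- ===== SOURCE B (Python) =====
-- def gen_id_mapper(shift_all, shift_target):
--     rev = {name: tid for tid, name in shift_target.items()}
--     id_mapper = {old_id: rev[name] for old_id, name in shift_all.items() if name in rev}
--     unmatched = [old_id for old_id, name in shift_all.items() if name not in rev]
--     need = len(unmatched)
--     # fresh ids are the gaps of the sorted non-negative used target ids, then the tail above them
--     used = sorted(t for t in set(rev.values()) if t >= 0)
--     fresh = []
--     c = 0
--     for u in used:
--         take = min(u - c, need - len(fresh))
--         fresh.extend(range(c, c + take))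
--         c = u + 1
--     fresh.extend(range(c, c + need - len(fresh)))
--     id_mapper.update(zip(unmatched, fresh))
--     return id_mapper
-- ===== Notes on version B (the rewrite author's own statement) =====
-- stated objective: alternative
-- what changed: A's counter that is incremented past used ids by testing every candidate integer against the reverse dict's values view is replaced by arithmetic gap extraction: the used target ids are sorted once and the fresh ids are read off as the integer ranges between consecutive used ids, then zipped onto the unmatched ids.
import Mathlib
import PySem

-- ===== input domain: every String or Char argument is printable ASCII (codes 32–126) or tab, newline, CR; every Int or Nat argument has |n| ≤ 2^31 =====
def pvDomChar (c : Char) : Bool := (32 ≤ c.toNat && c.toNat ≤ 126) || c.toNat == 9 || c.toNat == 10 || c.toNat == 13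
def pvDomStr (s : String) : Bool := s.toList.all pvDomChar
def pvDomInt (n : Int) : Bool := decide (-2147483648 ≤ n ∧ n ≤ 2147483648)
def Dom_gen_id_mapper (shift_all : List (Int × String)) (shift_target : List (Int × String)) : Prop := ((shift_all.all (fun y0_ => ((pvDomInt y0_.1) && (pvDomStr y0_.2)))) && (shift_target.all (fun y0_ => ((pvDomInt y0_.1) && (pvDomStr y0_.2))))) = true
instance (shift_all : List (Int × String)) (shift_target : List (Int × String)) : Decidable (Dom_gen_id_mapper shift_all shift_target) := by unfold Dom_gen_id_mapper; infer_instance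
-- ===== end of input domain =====

-- B replaces A's per-candidate counter scan (a while-loop testing each integer against the
-- reverse dict's values) by arithmetic gap extraction: the used target ids are sorted once and
-- the fresh ids are read off as the ranges between consecutive used ids (objective: alternative).

-- ===== PORT A =====
-- termination helpers for the Python 'while counter in shift_target_reverse.values(): counter += 1'
theorem filter_le_mono (t : List Int) (c : Int) :
    (t.filter (fun v => decide (c < v))).length
      ≤ (t.filter (fun v => decide (c ≤ v))).length := by
  induction t with
  | nil => simp
  | cons a t ih =>
    simp only [List.filter_cons]
    by_cases h1 : c < a <;> by_cases h2 : c ≤ a <;> simp [h1, h2] <;> omega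

theorem pySkip_measure (vals : List Int) (c : Int) (h : vals.contains c = true) :
    (vals.filter (fun v => decide (c + 1 ≤ v))).length
      < (vals.filter (fun v => decide (c ≤ v))).length := by
  have hf : (fun v : Int => decide (c + 1 ≤ v)) = (fun v : Int => decide (c < v)) := by
    funext v
    have hiff : (c + 1 ≤ v) ↔ (c < v) := by omega
    simp [hiff]
  rw [hf]
  have hm : c ∈ vals := by simpa using h
  induction vals with
  | nil => cases hm
  | cons a t ih =>
    simp only [List.filter_cons]
    rcases List.mem_cons.mp hm with rfl | ha
    · have := filter_le_mono t c
      simp only [lt_self_iff_false, decide_false, le_refl, decide_true, if_false, if_true,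
        Bool.false_eq_true, List.length_cons]
      omega
    · have ht := ih (by simpa using ha) ha
      by_cases h1 : c < a <;> by_cases h2 : c ≤ a <;> simp [h1, h2] <;> omega

def pySkip (vals : List Int) (c : Int) : Int :=
  if h : vals.contains c then pySkip vals (c + 1) else c
termination_by (vals.filter (fun v => decide (c ≤ v))).length
decreasing_by exact pySkip_measure vals c h

def gen_id_mapper (shift_all : List (Int × String)) (shift_target : List (Int × String)) : List (Int × Int) :=
  let saD := PySem.Dict.ofList shift_all
  let stD := PySem.Dict.ofList shift_target
  let rev : PySem.Dict String Int :=
    stD.items.foldl (fun r p => r.insert p.2 p.1) PySem.Dict.empty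
  -- first pass: map items whose name occurs in the reverse dict
  let m1 : PySem.Dict Int Int :=
    saD.items.foldl (fun m p => if rev.contains p.2 then m.insert p.1 (rev.getD p.2 0) else m)
      PySem.Dict.empty
  -- second pass: assign counter values (skipping used ones) to the remaining items
  let res :=
    saD.items.foldl
      (fun (mc : PySem.Dict Int Int × Int) p =>
        if rev.contains p.2 then mc
        else
          let c := pySkip rev.values mc.2
          (mc.1.insert p.1 c, c + 1))
      (m1, 0)
  res.1.items

-- ===== PORT B =====
def gen_id_mapper_alt (shift_all : List (Int × String)) (shift_target : List (Int × String)) : List (Int × Int) :=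
  let saD := PySem.Dict.ofList shift_all
  let stD := PySem.Dict.ofList shift_target
  let rev : PySem.Dict String Int :=
    stD.items.foldl (fun r p => r.insert p.2 p.1) PySem.Dict.empty
  -- dict comprehension: matched items
  let idMapper : PySem.Dict Int Int :=
    saD.items.foldl (fun m p => if rev.contains p.2 then m.insert p.1 (rev.getD p.2 0) else m)
      PySem.Dict.empty
  -- list comprehension: unmatched old ids
  let unmatched := (saD.items.filter (fun p => !(rev.contains p.2))).map (·.1)
  let need : Int := unmatched.length
  -- used = sorted(t for t in set(rev.values()) if t >= 0)
  let used : List Int :=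
    PySem.List.sorted ((PySem.Set.ofList rev.values).filter (fun t => decide (0 ≤ t)))
      (fun x => x) false
  -- for u in used: take = min(u-c, need-len(fresh)); fresh.extend(range(c, c+take)); c = u+1
  let s :=
    used.foldl
      (fun (s : List Int × Int) u =>
        (s.1 ++ PySem.List.pyRange s.2 (s.2 + min (u - s.2) (need - s.1.length)) 1, u + 1))
      ([], 0)
  -- fresh.extend(range(c, c + need - len(fresh)))
  let fresh := s.1 ++ PySem.List.pyRange s.2 (s.2 + (need - s.1.length)) 1
  ((unmatched.zip fresh).foldl (fun m kv => m.insert kv.1 kv.2) idMapper).items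

-- ===== PRECONDITION & SPEC =====
def Spec_gen_id_mapper (shift_all : List (Int × String)) (shift_target : List (Int × String)) (out : List (Int × Int)) : Prop := out = gen_id_mapper_alt shift_all shift_target
instance (shift_all : List (Int × String)) (shift_target : List (Int × String)) (out : List (Int × Int)) : Decidable (Spec_gen_id_mapper shift_all shift_target out) := by unfold Spec_gen_id_mapper; infer_instance

-- ===== CLAIM (what is proved, stated in full; the proofs are below) =====
def Claim_equal_gen_id_mapper : Prop := ∀ (shift_all : List (Int × String)) (shift_target : List (Int × String)), Dom_gen_id_mapper shift_all shift_target → Spec_gen_id_mapper shift_all shift_target (gen_id_mapper shift_all shift_target)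

-- ===== LEMMAS AND PROOFS =====
-- the increasing sequence of the first n integers ≥ c that are not in vals (A's fresh ids)
def pyFresh (vals : List Int) (n : Nat) (i : Int) : List Int :=
  match n with
  | 0 => []
  | Nat.succ m =>
    if h : vals.contains i then pyFresh vals (Nat.succ m) (i + 1)
    else i :: pyFresh vals m (i + 1)
termination_by (n, (vals.filter (fun v => decide (i ≤ v))).length)
decreasing_by
  · exact Prod.Lex.right _ (pySkip_measure vals i h)
  · exact Prod.Lex.left _ _ (Nat.lt_succ_self m)

theorem pyFresh_cons (vals : List Int) (n : Nat) (i : Int) :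
    pyFresh vals (n + 1) i = pySkip vals i :: pyFresh vals n (pySkip vals i + 1) := by
  fun_induction pySkip vals i with
  | case1 c hc ih =>
    conv_lhs => rw [pyFresh]
    rw [dif_pos hc]
    exact ih
  | case2 c hc =>
    conv_lhs => rw [pyFresh]
    rw [dif_neg hc]

-- A's second pass over shift_all, reduced to a zip of the unmatched ids with pyFresh
theorem pass2_eq (rev : PySem.Dict String Int) :
    ∀ (l : List (Int × String)) (m : PySem.Dict Int Int) (c : Int),
    (l.foldl
      (fun (mc : PySem.Dict Int Int × Int) p =>
        if rev.contains p.2 then mc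
        else
          let c' := pySkip rev.values mc.2
          (mc.1.insert p.1 c', c' + 1)) (m, c)).1
    = (((l.filter (fun p => !(rev.contains p.2))).map (·.1)).zip
         (pyFresh rev.values ((l.filter (fun p => !(rev.contains p.2))).map (·.1)).length c)).foldl
        (fun m kv => m.insert kv.1 kv.2) m := by
  intro l
  induction l with
  | nil => intro m c; simp [pyFresh]
  | cons p t ih =>
    intro m c
    by_cases hp : rev.contains p.2
    · simp only [List.foldl_cons, List.filter_cons, hp, Bool.not_true, if_pos, if_neg,
        Bool.false_eq_true, not_false_iff]
      exact ih m c
    · have hp' : rev.contains p.2 = false := by simpa using hp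
      simp only [List.foldl_cons, List.filter_cons, hp', Bool.not_false, if_neg, if_pos,
        Bool.false_eq_true, not_false_iff, List.map_cons, List.length_cons]
      rw [pyFresh_cons]
      simp only [List.zip_cons_cons, List.foldl_cons]
      exact ih (m.insert p.1 (pySkip rev.values c)) (pySkip rev.values c + 1)

-- a stretch of integers free of vals is emitted verbatim by pyFresh
theorem pyFresh_free (vals : List Int) (n : Nat) (c : Int)
    (h : ∀ x, c ≤ x → x < c + n → vals.contains x = false) :
    pyFresh vals n c = PySem.List.pyRange c (c + n) 1 := by
  induction n generalizing c with
  | zero => rw [pyFresh]; simp [PySem.List.pyRange_one_eq_nil]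
  | succ m ih =>
    have hc : vals.contains c = false := h c le_rfl (by omega)
    have hcne : ¬ vals.contains c = true := by rw [hc]; simp
    conv_lhs => rw [pyFresh]
    rw [dif_neg hcne]
    rw [ih (c + 1) (fun x h1 h2 => h x (by omega) (by omega))]
    have hb2 : c + ((m + 1 : Nat) : Int) = c + ((m : Int) + 1) := by push_cast; ring
    rw [hb2, PySem.List.pyRange_one_cons (show c < c + ((m : Int) + 1) by omega)]
    have hb : c + 1 + (m : Int) = c + ((m : Int) + 1) := by omega
    rw [hb]

-- run up to the next used id u: emit [c, u), skip u
theorem pyFresh_run (vals : List Int) (u : Int) (hu : vals.contains u = true) :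
    ∀ (k : Nat) (c : Int) (N : Nat), c ≤ u → (u - c).toNat = k →
    (∀ x, c ≤ x → x < u → vals.contains x = false) → k < N →
    pyFresh vals N c = PySem.List.pyRange c u 1 ++ pyFresh vals (N - k) (u + 1) := by
  intro k
  induction k with
  | zero =>
    intro c N hcu hk _ hN
    have hce : c = u := by omega
    subst hce
    obtain ⟨M, rfl⟩ : ∃ M, N = M + 1 := ⟨N - 1, by omega⟩
    rw [PySem.List.pyRange_one_eq_nil le_rfl, List.nil_append]
    conv_lhs => rw [pyFresh]
    rw [dif_pos hu]
    simp
  | succ k ih =>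
    intro c N hcu hk hfree hN
    have hlt : c < u := by omega
    have hc : vals.contains c = false := hfree c le_rfl hlt
    obtain ⟨M, rfl⟩ : ∃ M, N = M + 1 := ⟨N - 1, by omega⟩
    have hcne : ¬ vals.contains c = true := by rw [hc]; simp
    conv_lhs => rw [pyFresh]
    rw [dif_neg hcne]
    rw [ih (c + 1) M (by omega) (by omega) (fun x h1 h2 => hfree x (by omega) h2) (by omega)]
    rw [PySem.List.pyRange_one_cons hlt, List.cons_append]
    have : M - k = M + 1 - (k + 1) := by omega
    rw [this]

-- the gap walk over a strictly increasing list of exactly the members of vals ≥ c is pyFresh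
theorem gap_eq (vals : List Int) :
    ∀ (used : List Int) (acc : List Int) (c : Int) (need : Int),
    used.Pairwise (· < ·) → (∀ u ∈ used, c ≤ u) →
    (∀ x, c ≤ x → (vals.contains x = true ↔ x ∈ used)) →
    (acc.length : Int) ≤ need →
    (let s :=
      used.foldl
        (fun (s : List Int × Int) u =>
          (s.1 ++ PySem.List.pyRange s.2 (s.2 + min (u - s.2) (need - s.1.length)) 1, u + 1))
        (acc, c);
     s.1 ++ PySem.List.pyRange s.2 (s.2 + (need - s.1.length)) 1)
    = acc ++ pyFresh vals (need - acc.length).toNat c := by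
  intro used
  induction used with
  | nil =>
    intro acc c need _ _ H hlen
    simp only [List.foldl_nil]
    rw [pyFresh_free vals _ c (fun x h1 _ => by
      have h2 := H x h1
      simp only [List.not_mem_nil, iff_false] at h2
      simpa using h2)]
    have hb : c + (((need - (acc.length : Int)).toNat : Nat) : Int) = c + (need - acc.length) := by
      omega
    rw [hb]
  | cons u us ih =>
    intro acc c need hpw hge H hlen
    have hcu : c ≤ u := hge u List.mem_cons_self
    have hu : vals.contains u = true := (H u hcu).mpr List.mem_cons_self
    have hfree : ∀ x, c ≤ x → x < u → vals.contains x = false := by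
      intro x h1 h2
      by_contra hx
      have hx' : vals.contains x = true := by simpa using hx
      rcases List.mem_cons.mp ((H x h1).mp hx') with rfl | h
      · omega
      · have := (List.pairwise_cons.mp hpw).1 x h; omega
    simp only [List.foldl_cons]
    set t : Int := min (u - c) (need - acc.length) with ht
    have ht0 : 0 ≤ t := by omega
    have hlen2 : (((acc ++ PySem.List.pyRange c (c + t) 1).length : Nat) : Int)
        = acc.length + t := by
      rw [List.length_append, PySem.List.length_pyRange_one]
      push_cast
      omega
    have hrec := ih (acc ++ PySem.List.pyRange c (c + t) 1) (u + 1) need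
      (List.pairwise_cons.mp hpw).2
      (fun v hv => by have := (List.pairwise_cons.mp hpw).1 v hv; omega)
      (fun x hx => by
        rw [H x (by omega), List.mem_cons]
        constructor
        · rintro (rfl | h)
          · omega
          · exact h
        · exact Or.inr)
      (by omega)
    simp only at hrec
    rw [hrec, hlen2, List.append_assoc]
    congr 1
    by_cases hcase : need - (acc.length : Int) ≤ u - c
    · -- t = need - acc.length : the whole remaining demand fits below u
      have hz : (need - ((acc.length : Int) + t)).toNat = 0 := by omega
      rw [hz, pyFresh, List.append_nil]
      rw [pyFresh_free vals (need - (acc.length : Int)).toNat c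
        (fun x h1 h2 => hfree x h1 (by omega))]
      have hb : c + (((need - (acc.length : Int)).toNat : Nat) : Int) = c + t := by omega
      rw [hb]
    · -- t = u - c : emit the gap [c,u), skip u, continue after it
      rw [pyFresh_run vals u hu (u - c).toNat c (need - (acc.length : Int)).toNat hcu rfl hfree
        (by omega)]
      have hb : c + t = u := by omega
      rw [hb]
      have hn : (need - (acc.length : Int)).toNat - (u - c).toNat
          = (need - ((acc.length : Int) + t)).toNat := by omega
      rw [hn]

-- properties of used = sorted(filter nonneg (set vals))
theorem used_pairwise (vals : List Int) :
    (PySem.List.sorted ((PySem.Set.ofList vals).filter (fun t => decide (0 ≤ t)))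
      (fun x => x) false).Pairwise (· < ·) := by
  have hnd : ((PySem.Set.ofList vals).filter (fun t => decide (0 ≤ t))).Nodup :=
    (PySem.Set.nodup_ofList vals).filter _
  have hnd2 : (PySem.List.sorted ((PySem.Set.ofList vals).filter (fun t => decide (0 ≤ t)))
      (fun x => x) false).Nodup :=
    (PySem.List.sorted_perm _ _ _).symm.nodup hnd
  have hle := PySem.List.sorted_pairwise
    ((PySem.Set.ofList vals).filter (fun t => decide (0 ≤ t))) (fun x => x)
  exact (hle.and hnd2).imp (fun h => lt_of_le_of_ne h.1 h.2)

theorem used_mem (vals : List Int) (x : Int) :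
    x ∈ PySem.List.sorted ((PySem.Set.ofList vals).filter (fun t => decide (0 ≤ t)))
      (fun x => x) false ↔ x ∈ vals ∧ 0 ≤ x := by
  rw [PySem.List.mem_sorted, List.mem_filter, PySem.Set.mem_ofList]
  simp

-- ===== VERDICT (by name: the statement is the Claim_ definition above) =====
theorem gen_id_mapper_spec : Claim_equal_gen_id_mapper := by
  intro shift_all shift_target _
  show _ = gen_id_mapper_alt shift_all shift_target
  simp only [gen_id_mapper, gen_id_mapper_alt]
  set rev : PySem.Dict String Int :=
    (PySem.Dict.ofList shift_target).items.foldl (fun r p => r.insert p.2 p.1) PySem.Dict.empty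
  rw [pass2_eq rev]
  congr 1
  set unmatched := (((PySem.Dict.ofList shift_all).items.filter
      (fun p => !(rev.contains p.2))).map (·.1))
  have hg := gap_eq rev.values
    (PySem.List.sorted ((PySem.Set.ofList rev.values).filter (fun t => decide (0 ≤ t)))
      (fun x => x) false)
    [] 0 (unmatched.length)
    (used_pairwise rev.values)
    (fun u hu => ((used_mem rev.values u).mp hu).2)
    (fun x hx => by
      rw [used_mem]
      constructor
      · intro h; exact ⟨by simpa using h, hx⟩
      · intro h; simpa using h.1)
    (by simp)
  simp only [List.nil_append, List.length_nil, Nat.cast_zero, Int.sub_zero, Int.toNat_natCast]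
    at hg
  rw [hg]
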